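-- pv_equiv track=rewrite | github.com/homebrew9/hackerrank_solutions | algorithms/greedy/cloudy_day.py | maximumPeople
-- ===== SOURCE A (Python) =====
-- from collections import defaultdict
--
-- def maximumPeople(p, x, y, r):
--     # Return the maximum number of people that will be in a sunny town after removing exactly one cloud.
--     towns = [[xi, pi, -1] for xi, pi in zip(x, p)]
--     towns = sorted(towns)
--     m = len(y)
--     cloud_start = [[y[i]-r[i], i] for i in range(m)]
--     cloud_end = [[y[i]+r[i], i] for i in range(m)]
--     cloud_start = sorted(cloud_start)
--     cloud_end = sorted(cloud_end)
--     cloud_start_i = 0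
--     cloud_end_i = 0
--     clouds = set()
--
--     d = defaultdict(int)
--     free = 0
--     for town_i in range(len(towns)):
--         town_x = towns[town_i][0]
--         while cloud_start_i < len(cloud_start) and cloud_start[cloud_start_i][0] <= town_x:
--             clouds.add(cloud_start[cloud_start_i][1])
--             cloud_start_i += 1
--         while cloud_end_i < len(cloud_end) and cloud_end[cloud_end_i][0] < town_x:
--             clouds.remove(cloud_end[cloud_end_i][1])
--             cloud_end_i += 1
--         if len(clouds) == 1:
--             towns[town_i][2] = list(clouds)[0]
--             d[list(clouds)[0]] += towns[town_i][1]
--         elif len(clouds) == 0: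
--             free += towns[town_i][1]
--     return max(d.values(), default=0) + free
-- ===== SOURCE B (Python) =====
-- def maximumPeople(p, x, y, r):
--     # Brute force: for each town, list the clouds covering it directly (no sorting, no sweep).
--     free = 0
--     best = {}
--     for xi, pi in zip(x, p):
--         cover = [j for j in range(len(y)) if y[j] - r[j] <= xi <= y[j] + r[j]]
--         if not cover:
--             free += pi
--         elif len(cover) == 1:
--             best[cover[0]] = best.get(cover[0], 0) + pi
--     return max(best.values(), default=0) + free
-- ===== Notes on version B (the rewrite author's own statement) =====
-- stated objective: alternative
-- what changed: Replaces the sort-the-events-and-sweep-with-a-cloud-set algorithm by a direct per-town scan: for each town it lists the covering cloud indices straight from y and r, with no sorting, no event lists and no sweep state.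
import Mathlib
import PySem

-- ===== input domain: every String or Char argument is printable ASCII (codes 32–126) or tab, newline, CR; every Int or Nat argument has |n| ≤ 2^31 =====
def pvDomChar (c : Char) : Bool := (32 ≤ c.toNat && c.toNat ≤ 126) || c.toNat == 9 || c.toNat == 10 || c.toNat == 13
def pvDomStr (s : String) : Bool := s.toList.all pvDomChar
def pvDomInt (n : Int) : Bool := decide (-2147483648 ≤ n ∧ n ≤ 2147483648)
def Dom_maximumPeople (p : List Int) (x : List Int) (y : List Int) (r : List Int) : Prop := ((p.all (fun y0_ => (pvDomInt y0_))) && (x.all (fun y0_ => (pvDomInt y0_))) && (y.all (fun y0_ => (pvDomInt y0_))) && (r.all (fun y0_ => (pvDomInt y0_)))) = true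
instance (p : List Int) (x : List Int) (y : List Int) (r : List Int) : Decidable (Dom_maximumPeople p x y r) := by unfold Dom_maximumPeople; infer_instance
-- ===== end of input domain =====

-- B replaces A's sort-the-events-and-sweep-with-a-cloud-set algorithm by a direct per-town
-- scan of the clouds (no sorting, no event lists, no sweep state); equivalence is proved on
-- Pre_, which excludes exactly the inputs where A raises.

-- ===== PORT A =====
-- Port of A (the event sweep).  Faithfulness notes: A's town records [xi, pi, -1] carry a
-- third field that is constant (-1) when the list is sorted and is later written but never
-- read, so towns are ported as (x, p) pairs; the two inner `while` loops walk the sorted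
-- event lists by index and are ported as the recursions pvProcStarts / pvProcEnds over the
-- remaining event list; `clouds.remove(id)` is ported by the total form pvRemove, exact
-- wherever Python does not raise KeyError (Pre_ excludes the raising inputs); and
-- `list(clouds)[0]` is only taken on a singleton set, where iteration order is irrelevant.
def pvRemove (s : PySem.Set Int) (v : Int) : PySem.Set Int := (PySem.Set.remove? s v).getD s

def pvProcStarts : List (Int × Int) → Int → PySem.Set Int → List (Int × Int) × PySem.Set Int
  | [], _, cl => ([], cl)
  | e :: rest, t, cl => if e.1 ≤ t then pvProcStarts rest t (PySem.Set.add cl e.2) else (e :: rest, cl)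

def pvProcEnds : List (Int × Int) → Int → PySem.Set Int → List (Int × Int) × PySem.Set Int
  | [], _, cl => ([], cl)
  | e :: rest, t, cl => if e.1 < t then pvProcEnds rest t (pvRemove cl e.2) else (e :: rest, cl)

def pvLoopA : List (Int × Int) → List (Int × Int) → List (Int × Int) → PySem.Set Int → PySem.Dict Int Int → Int → PySem.Dict Int Int × Int
  | [], _, _, _, d, free => (d, free)
  | tw :: rest, cs, ce, cl, d, free =>
    let cs' := (pvProcStarts cs tw.1 cl).1
    let cl1 := (pvProcStarts cs tw.1 cl).2
    let ce' := (pvProcEnds ce tw.1 cl1).1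
    let cl2 := (pvProcEnds ce tw.1 cl1).2
    if cl2.length = 1 then
      pvLoopA rest cs' ce' cl2 (d.modify (cl2.headD 0) 0 (· + tw.2)) free
    else if cl2.length = 0 then
      pvLoopA rest cs' ce' cl2 d (free + tw.2)
    else
      pvLoopA rest cs' ce' cl2 d free

def maximumPeople (p : List Int) (x : List Int) (y : List Int) (r : List Int) : Int :=
  let towns := PySem.List.sorted2 (x.zip p) Prod.fst Prod.snd
  let m : Int := (y.length : Int)
  let cloudStart := PySem.List.sorted2
    ((PySem.List.pyRange 0 m).map (fun i => (PySem.List.pyGetD y i 0 - PySem.List.pyGetD r i 0, i)))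
    Prod.fst Prod.snd
  let cloudEnd := PySem.List.sorted2
    ((PySem.List.pyRange 0 m).map (fun i => (PySem.List.pyGetD y i 0 + PySem.List.pyGetD r i 0, i)))
    Prod.fst Prod.snd
  let res := pvLoopA towns cloudStart cloudEnd PySem.Set.empty PySem.Dict.empty 0
  (PySem.List.max? res.1.values (fun v => v)).getD 0 + res.2

-- ===== PORT B =====
-- Port of B (Source B): one direct pass over zip(x, p); for each town the list of covering
-- cloud indices is recomputed by scanning range(len(y)).
def pvCover (y r : List Int) (t : Int) : List Int :=
  (PySem.List.pyRange 0 (y.length : Int)).filter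
    (fun j => decide (PySem.List.pyGetD y j 0 - PySem.List.pyGetD r j 0 ≤ t) &&
              decide (t ≤ PySem.List.pyGetD y j 0 + PySem.List.pyGetD r j 0))

def maximumPeople_alt (p : List Int) (x : List Int) (y : List Int) (r : List Int) : Int :=
  let res := (x.zip p).foldl
    (fun (st : Int × PySem.Dict Int Int) q =>
      let cover := pvCover y r q.1
      if cover = [] then (st.1 + q.2, st.2)
      else if cover.length = 1 then
        (st.1, st.2.insert (cover.headD 0) (st.2.getD (cover.headD 0) 0 + q.2))
      else st)
    (0, PySem.Dict.empty)
  (PySem.List.max? res.2.values (fun v => v)).getD 0 + res.1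

-- ===== PRECONDITION & SPEC =====
-- Pre_ excludes exactly the inputs on which the Python A raises: IndexError when
-- len(r) < len(y), and KeyError when some town lies strictly between a (negative-radius)
-- cloud's end y[j]+r[j] and its start y[j]-r[j].
def Pre_maximumPeople (p : List Int) (x : List Int) (y : List Int) (r : List Int) : Prop :=
  y.length ≤ r.length ∧
  ∀ j ∈ PySem.List.pyRange 0 (y.length : Int), ∀ t ∈ (x.zip p).map Prod.fst,
    ¬ (PySem.List.pyGetD y j 0 + PySem.List.pyGetD r j 0 < t ∧
       t < PySem.List.pyGetD y j 0 - PySem.List.pyGetD r j 0)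
instance (p : List Int) (x : List Int) (y : List Int) (r : List Int) : Decidable (Pre_maximumPeople p x y r) := by unfold Pre_maximumPeople; infer_instance

def pvWitness_maximumPeople : List Int × List Int × List Int × List Int := ([2], [3], [0], [5])

def Spec_maximumPeople (p : List Int) (x : List Int) (y : List Int) (r : List Int) (out : Int) : Prop := out = maximumPeople_alt p x y r
instance (p : List Int) (x : List Int) (y : List Int) (r : List Int) (out : Int) : Decidable (Spec_maximumPeople p x y r out) := by unfold Spec_maximumPeople; infer_instance

-- ===== CLAIM (what is proved, stated in full; the proofs are below) =====
def Claim_equal_maximumPeople : Prop := ∀ (p : List Int) (x : List Int) (y : List Int) (r : List Int), Dom_maximumPeople p x y r → Pre_maximumPeople p x y r → Spec_maximumPeople p x y r (maximumPeople p x y r)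

-- ===== LEMMAS AND PROOFS =====

-- Spec-level abbreviations used only by the proofs.
def pvCSL (y r : List Int) : List (Int × Int) :=
  PySem.List.sorted2
    ((PySem.List.pyRange 0 (y.length : Int)).map (fun i => (PySem.List.pyGetD y i 0 - PySem.List.pyGetD r i 0, i)))
    Prod.fst Prod.snd

def pvCEL (y r : List Int) : List (Int × Int) :=
  PySem.List.sorted2
    ((PySem.List.pyRange 0 (y.length : Int)).map (fun i => (PySem.List.pyGetD y i 0 + PySem.List.pyGetD r i 0, i)))
    Prod.fst Prod.snd

def pvStepB (y r : List Int) (st : Int × PySem.Dict Int Int) (q : Int × Int) : Int × PySem.Dict Int Int :=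
  let cover := pvCover y r q.1
  if cover = [] then (st.1 + q.2, st.2)
  else if cover.length = 1 then
    (st.1, st.2.insert (cover.headD 0) (st.2.getD (cover.headD 0) 0 + q.2))
  else st

def pvSumFree (y r : List Int) (ts : List (Int × Int)) : Int :=
  ((ts.filter (fun q => decide (pvCover y r q.1 = []))).map Prod.snd).sum

def pvSumKey (y r : List Int) (c : Int) (ts : List (Int × Int)) : Int :=
  ((ts.filter (fun q => decide (pvCover y r q.1 = [c]))).map Prod.snd).sum

lemma pv_mem_pvCover (y r : List Int) (t c : Int) :
    c ∈ pvCover y r t ↔ 0 ≤ c ∧ c < (y.length : Int) ∧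
      PySem.List.pyGetD y c 0 - PySem.List.pyGetD r c 0 ≤ t ∧
      t ≤ PySem.List.pyGetD y c 0 + PySem.List.pyGetD r c 0 := by
  simp [pvCover, List.mem_filter, PySem.List.mem_pyRange_one, and_assoc]

lemma pv_nodup_pyRange (n : Nat) : (PySem.List.pyRange 0 (n : Int)).Nodup := by
  rw [PySem.List.pyRange_zero_natCast]
  exact (List.nodup_range).map (fun a b h => by exact_mod_cast h)

lemma pv_nodup_pvCover (y r : List Int) (t : Int) : (pvCover y r t).Nodup :=
  (pv_nodup_pyRange y.length).filter _

lemma pv_insertBy_pairwise {α : Type} (R : α → α → Prop) (before : α → α → Bool)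
    (htrans : ∀ {a b c}, R a b → R b c → R a c)
    (hT : ∀ a b, before a b = true → R a b) (hF : ∀ a b, before a b = false → R b a)
    (x : α) (l : List α) (h : l.Pairwise R) :
    (PySem.List.insertBy before x l).Pairwise R := by
  induction l with
  | nil => simp [PySem.List.insertBy]
  | cons a l ih =>
    rw [List.pairwise_cons] at h
    by_cases hb : before x a = true
    · rw [show PySem.List.insertBy before x (a :: l) = x :: a :: l by
        simp [PySem.List.insertBy, hb]]
      refine List.pairwise_cons.mpr ⟨?_, List.pairwise_cons.mpr ⟨h.1, h.2⟩⟩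
      intro z hz
      rcases List.mem_cons.mp hz with rfl | hzl
      · exact hT _ _ hb
      · exact htrans (hT _ _ hb) (h.1 z hzl)
    · rw [show PySem.List.insertBy before x (a :: l) = a :: PySem.List.insertBy before x l by
        simp [PySem.List.insertBy, hb]]
      refine List.pairwise_cons.mpr ⟨?_, ih h.2⟩
      intro z hz
      rcases (PySem.List.mem_insertBy before x z l).mp hz with rfl | hzl
      · exact hF _ _ (by simpa using hb)
      · exact h.1 z hzl

lemma pv_foldl_insertBy_pairwise {α : Type} (R : α → α → Prop) (before : α → α → Bool)
    (htrans : ∀ {a b c}, R a b → R b c → R a c)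
    (hT : ∀ a b, before a b = true → R a b) (hF : ∀ a b, before a b = false → R b a) :
    ∀ (xs acc : List α), acc.Pairwise R →
      (xs.foldl (fun acc x => PySem.List.insertBy before x acc) acc).Pairwise R := by
  intro xs
  induction xs with
  | nil => intro acc h; exact h
  | cons a xs ih =>
    intro acc h
    exact ih _ (pv_insertBy_pairwise R before htrans hT hF a acc h)

lemma pv_sorted2_pairwise_fst {α : Type} (xs : List α) (k1 k2 : α → Int) :
    (PySem.List.sorted2 xs k1 k2).Pairwise (fun a b => k1 a ≤ k1 b) := by
  have := pv_foldl_insertBy_pairwise (fun a b => k1 a ≤ k1 b)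
    (fun a b => decide (k1 a < k1 b) || (!decide (k1 b < k1 a) && decide (k2 a < k2 b)))
    (fun h1 h2 => le_trans h1 h2)
    (by intro a b hb; simp only [Bool.or_eq_true, Bool.and_eq_true, decide_eq_true_eq,
          Bool.not_eq_true', decide_eq_false_iff_not] at hb
        rcases hb with h | ⟨h, _⟩ <;> omega)
    (by intro a b hb; simp only [Bool.or_eq_false_iff, Bool.and_eq_false_iff,
          decide_eq_false_iff_not, Bool.not_eq_false', decide_eq_true_eq] at hb
        omega)
    xs [] List.Pairwise.nil
  simpa [PySem.List.sorted2] using this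

lemma pv_procStarts_eq (t : Int) :
    ∀ (cs : List (Int × Int)) (cl : PySem.Set Int),
      cs.Pairwise (fun a b => a.1 ≤ b.1) →
      pvProcStarts cs t cl = (cs.filter (fun e => decide (t < e.1)),
        (cs.filter (fun e => decide (e.1 ≤ t))).foldl (fun s e => PySem.Set.add s e.2) cl) := by
  intro cs
  induction cs with
  | nil => intro cl _; simp [pvProcStarts]
  | cons e rest ih =>
    intro cl h
    rw [List.pairwise_cons] at h
    by_cases he : e.1 ≤ t
    · simp only [pvProcStarts, if_pos he, List.filter_cons,
        show decide (t < e.1) = false by simp; omega,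
        show decide (e.1 ≤ t) = true by simpa using he]
      rw [ih _ h.2]
      simp [List.foldl_cons]
    · have h2 : t < e.1 := by omega
      simp only [pvProcStarts, if_neg he, List.filter_cons,
        show decide (t < e.1) = true by simpa using h2,
        show decide (e.1 ≤ t) = false by simp; omega]
      rw [List.filter_eq_self.mpr (fun a ha => by
            have := h.1 a ha; simp; omega),
          List.filter_eq_nil_iff.mpr (fun a ha => by
            have := h.1 a ha; simp; omega)]
      simp

lemma pv_procEnds_eq (t : Int) :
    ∀ (ce : List (Int × Int)) (cl : PySem.Set Int),
      ce.Pairwise (fun a b => a.1 ≤ b.1) →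
      pvProcEnds ce t cl = (ce.filter (fun e => decide (t ≤ e.1)),
        (ce.filter (fun e => decide (e.1 < t))).foldl (fun s e => pvRemove s e.2) cl) := by
  intro ce
  induction ce with
  | nil => intro cl _; simp [pvProcEnds]
  | cons e rest ih =>
    intro cl h
    rw [List.pairwise_cons] at h
    by_cases he : e.1 < t
    · simp only [pvProcEnds, if_pos he, List.filter_cons,
        show decide (t ≤ e.1) = false by simp; omega,
        show decide (e.1 < t) = true by simpa using he]
      rw [ih _ h.2]
      simp [List.foldl_cons]
    · have h2 : t ≤ e.1 := by omega
      simp only [pvProcEnds, if_neg he, List.filter_cons,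
        show decide (t ≤ e.1) = true by simpa using h2,
        show decide (e.1 < t) = false by simp; omega]
      rw [List.filter_eq_self.mpr (fun a ha => by
            have := h.1 a ha; simp; omega),
          List.filter_eq_nil_iff.mpr (fun a ha => by
            have := h.1 a ha; simp; omega)]
      simp

lemma pv_mem_remove (s : PySem.Set Int) (v c : Int) :
    c ∈ pvRemove s v ↔ c ∈ s ∧ c ≠ v := by
  by_cases hv : v ∈ s
  · rw [pvRemove, PySem.Set.remove?_of_mem hv]
    simp [PySem.Set.mem_discard]
  · rw [pvRemove, (PySem.Set.remove?_eq_none_iff s v).mpr hv]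
    simp only [Option.getD_none]
    constructor
    · intro h; exact ⟨h, by rintro rfl; exact hv h⟩
    · exact fun h => h.1

lemma pv_nodup_remove (s : PySem.Set Int) (v : Int) (h : s.Nodup) : (pvRemove s v).Nodup := by
  by_cases hv : v ∈ s
  · rw [pvRemove, PySem.Set.remove?_of_mem hv]; exact PySem.Set.nodup_discard s v h
  · rw [pvRemove, (PySem.Set.remove?_eq_none_iff s v).mpr hv]; exact h

lemma pv_nodup_foldl_add (l : List (Int × Int)) :
    ∀ (s : PySem.Set Int), s.Nodup → (l.foldl (fun s e => PySem.Set.add s e.2) s).Nodup := by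
  induction l with
  | nil => intro s h; exact h
  | cons e l ih => intro s h; exact ih _ (PySem.Set.nodup_add s e.2 h)

lemma pv_mem_foldl_add (l : List (Int × Int)) :
    ∀ (s : PySem.Set Int) (c : Int),
      c ∈ l.foldl (fun s e => PySem.Set.add s e.2) s ↔ c ∈ s ∨ ∃ e ∈ l, c = e.2 := by
  induction l with
  | nil => intro s c; simp
  | cons e l ih =>
    intro s c
    rw [List.foldl_cons, ih]
    rw [PySem.Set.mem_add]
    constructor
    · rintro (⟨h | h⟩ | h)
      · exact Or.inl h
      · exact Or.inr ⟨e, List.mem_cons_self .., h⟩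
      · rcases h with ⟨e', he', rfl⟩; exact Or.inr ⟨e', List.mem_cons_of_mem _ he', rfl⟩
    · rintro (h | ⟨e', he', rfl⟩)
      · exact Or.inl (Or.inl h)
      · rcases List.mem_cons.mp he' with rfl | he'
        · exact Or.inl (Or.inr rfl)
        · exact Or.inr ⟨e', he', rfl⟩

lemma pv_nodup_foldl_remove (l : List (Int × Int)) :
    ∀ (s : PySem.Set Int), s.Nodup → (l.foldl (fun s e => pvRemove s e.2) s).Nodup := by
  induction l with
  | nil => intro s h; exact h
  | cons e l ih => intro s h; exact ih _ (pv_nodup_remove s e.2 h)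

lemma pv_mem_foldl_remove (l : List (Int × Int)) :
    ∀ (s : PySem.Set Int) (c : Int),
      c ∈ l.foldl (fun s e => pvRemove s e.2) s ↔ c ∈ s ∧ ∀ e ∈ l, c ≠ e.2 := by
  induction l with
  | nil => intro s c; simp
  | cons e l ih =>
    intro s c
    rw [List.foldl_cons, ih, pv_mem_remove]
    constructor
    · rintro ⟨⟨hs, hne⟩, hall⟩
      refine ⟨hs, ?_⟩
      intro e' he'
      rcases List.mem_cons.mp he' with rfl | he'
      · exact hne
      · exact hall e' he'
    · rintro ⟨hs, hall⟩
      exact ⟨⟨hs, hall e (List.mem_cons_self ..)⟩, fun e' he' => hall e' (List.mem_cons_of_mem _ he')⟩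


lemma pv_pyGetD_bound (l : List Int) (h : (l.all fun v => pvDomInt v) = true) (i : Int) :
    -2147483648 ≤ PySem.List.pyGetD l i 0 ∧ PySem.List.pyGetD l i 0 ≤ 2147483648 := by
  have hmem : PySem.List.pyGetD l i 0 ∈ l ∨ PySem.List.pyGetD l i 0 = 0 := by
    rw [PySem.List.pyGetD]
    cases hv : PySem.List.pyGet? l i with
    | none => simp
    | some v => left; simpa using PySem.List.mem_of_pyGet?_eq_some l hv
  rcases hmem with hm | hm
  · have := List.all_eq_true.mp h _ hm
    simp [pvDomInt] at this
    omega
  · omega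

lemma pv_mem_CSL (y r : List Int) (e : Int × Int) :
    e ∈ pvCSL y r ↔ ∃ j : Int, (0 ≤ j ∧ j < (y.length : Int)) ∧
      e = (PySem.List.pyGetD y j 0 - PySem.List.pyGetD r j 0, j) := by
  rw [pvCSL, (PySem.List.sorted2_perm _ _ _ _).mem_iff]
  simp [PySem.List.mem_pyRange_one, eq_comm]

lemma pv_mem_CEL (y r : List Int) (e : Int × Int) :
    e ∈ pvCEL y r ↔ ∃ j : Int, (0 ≤ j ∧ j < (y.length : Int)) ∧
      e = (PySem.List.pyGetD y j 0 + PySem.List.pyGetD r j 0, j) := by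
  rw [pvCEL, (PySem.List.sorted2_perm _ _ _ _).mem_iff]
  simp [PySem.List.mem_pyRange_one, eq_comm]

lemma pv_pairwise_CSL (y r : List Int) : (pvCSL y r).Pairwise (fun a b => a.1 ≤ b.1) :=
  pv_sorted2_pairwise_fst _ _ _

lemma pv_pairwise_CEL (y r : List Int) : (pvCEL y r).Pairwise (fun a b => a.1 ≤ b.1) :=
  pv_sorted2_pairwise_fst _ _ _

lemma pv_sumFree_cons (y r : List Int) (q : Int × Int) (ts : List (Int × Int)) :
    pvSumFree y r (q :: ts) = (if pvCover y r q.1 = [] then q.2 else 0) + pvSumFree y r ts := by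
  by_cases h : pvCover y r q.1 = [] <;> simp [pvSumFree, h]

lemma pv_sumKey_cons (y r : List Int) (c : Int) (q : Int × Int) (ts : List (Int × Int)) :
    pvSumKey y r c (q :: ts) = (if pvCover y r q.1 = [c] then q.2 else 0) + pvSumKey y r c ts := by
  by_cases h : pvCover y r q.1 = [c] <;> simp [pvSumKey, h]

lemma pv_exists_cons {α : Type} (P : α → Prop) (q : α) (ts : List α) :
    (∃ a ∈ q :: ts, P a) ↔ P q ∨ ∃ a ∈ ts, P a := by
  simp

-- The sweep invariant: after all towns of coordinate ≤ T have been processed, the pending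
-- event lists are the tails with coordinate beyond T and the active set holds exactly the
-- clouds whose interval contains T.
lemma pv_loopA_char (p x y r : List Int)
    (hDom : Dom_maximumPeople p x y r) (hPre : Pre_maximumPeople p x y r) :
    ∀ (ts : List (Int × Int)) (T : Int) (cs ce : List (Int × Int)) (cl : PySem.Set Int)
      (d : PySem.Dict Int Int) (free : Int),
    cs = (pvCSL y r).filter (fun e => decide (T < e.1)) →
    ce = (pvCEL y r).filter (fun e => decide (T ≤ e.1)) →
    (∀ c : Int, c ∈ cl ↔ (0 ≤ c ∧ c < (y.length : Int) ∧
        PySem.List.pyGetD y c 0 - PySem.List.pyGetD r c 0 ≤ T ∧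
        T ≤ PySem.List.pyGetD y c 0 + PySem.List.pyGetD r c 0)) →
    cl.Nodup →
    ts.Pairwise (fun a b => a.1 ≤ b.1) →
    (∀ q ∈ ts, q ∈ x.zip p) →
    (∀ q ∈ ts, T ≤ q.1) →
    (T = -4294967297 ∨ T ∈ (x.zip p).map Prod.fst) →
    d.keys.Nodup →
    (pvLoopA ts cs ce cl d free).2 = free + pvSumFree y r ts ∧
    (∀ c, (pvLoopA ts cs ce cl d free).1.getD c 0 = d.getD c 0 + pvSumKey y r c ts) ∧
    (∀ c, c ∈ (pvLoopA ts cs ce cl d free).1.keys ↔ c ∈ d.keys ∨ ∃ q ∈ ts, pvCover y r q.1 = [c]) ∧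
    (pvLoopA ts cs ce cl d free).1.keys.Nodup := by
  intro ts
  induction ts with
  | nil =>
    intro T cs ce cl d free _ _ _ _ _ _ _ _ hd
    simp [pvLoopA, pvSumFree, pvSumKey, hd]
  | cons q rest ih =>
    intro T cs ce cl d free h1 h2 h3 h4 h5 h6 h7 h8 hd
    have hq : q ∈ x.zip p := h6 q (List.mem_cons_self ..)
    have htm : q.1 ∈ (x.zip p).map Prod.fst := List.mem_map.mpr ⟨q, hq, rfl⟩
    have hTt : T ≤ q.1 := h7 q (List.mem_cons_self ..)
    have hDom' := hDom
    unfold Dom_maximumPeople at hDom'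
    simp only [Bool.and_eq_true] at hDom'
    obtain ⟨⟨⟨hpAll, hxAll⟩, hyAll⟩, hrAll⟩ := hDom'
    have hyb := fun i => pv_pyGetD_bound y hyAll i
    have hrb := fun i => pv_pyGetD_bound r hrAll i
    have hPre2 : ∀ c : Int, 0 ≤ c → c < (y.length : Int) →
        ∀ t' ∈ (x.zip p).map Prod.fst,
        ¬ (PySem.List.pyGetD y c 0 + PySem.List.pyGetD r c 0 < t' ∧
           t' < PySem.List.pyGetD y c 0 - PySem.List.pyGetD r c 0) := by
      intro c hc1 hc2 t' ht'
      exact hPre.2 c (PySem.List.mem_pyRange_one.mpr ⟨hc1, hc2⟩) t' ht'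
    have hcsPW : cs.Pairwise (fun a b => a.1 ≤ b.1) := h1 ▸ (pv_pairwise_CSL y r).filter _
    have hcePW : ce.Pairwise (fun a b => a.1 ≤ b.1) := h2 ▸ (pv_pairwise_CEL y r).filter _
    have hps := pv_procStarts_eq q.1 cs cl hcsPW
    have hcs' : (pvProcStarts cs q.1 cl).1 = (pvCSL y r).filter (fun e => decide (q.1 < e.1)) := by
      rw [hps]
      simp only
      rw [h1, List.filter_filter]
      exact List.filter_congr (fun e _ => by
        rcases (show q.1 < e.1 ∨ e.1 ≤ q.1 by omega) with h | h <;> simp <;> omega)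
    have hcl1 : ∀ c : Int, c ∈ (pvProcStarts cs q.1 cl).2 ↔
        (c ∈ cl ∨ (0 ≤ c ∧ c < (y.length : Int) ∧
          T < PySem.List.pyGetD y c 0 - PySem.List.pyGetD r c 0 ∧
          PySem.List.pyGetD y c 0 - PySem.List.pyGetD r c 0 ≤ q.1)) := by
      intro c
      rw [hps]
      simp only
      rw [pv_mem_foldl_add]
      apply or_congr_right
      constructor
      · rintro ⟨e, he, rfl⟩
        rw [List.mem_filter] at he
        obtain ⟨he1, he2⟩ := he
        rw [h1, List.mem_filter] at he1
        obtain ⟨heC, heT⟩ := he1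
        obtain ⟨j, ⟨hj1, hj2⟩, rfl⟩ := (pv_mem_CSL y r e).mp heC
        simp only [decide_eq_true_eq] at he2 heT
        exact ⟨hj1, hj2, heT, he2⟩
      · rintro ⟨hc1, hc2, hc3, hc4⟩
        refine ⟨(PySem.List.pyGetD y c 0 - PySem.List.pyGetD r c 0, c), ?_, rfl⟩
        rw [List.mem_filter, h1, List.mem_filter]
        exact ⟨⟨(pv_mem_CSL y r _).mpr ⟨c, ⟨hc1, hc2⟩, rfl⟩, by simp; omega⟩, by simp; omega⟩
    have hnd1 : (pvProcStarts cs q.1 cl).2.Nodup := by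
      rw [hps]; exact pv_nodup_foldl_add _ _ h4
    have hpe := pv_procEnds_eq q.1 ce (pvProcStarts cs q.1 cl).2 hcePW
    have hce' : (pvProcEnds ce q.1 (pvProcStarts cs q.1 cl).2).1 =
        (pvCEL y r).filter (fun e => decide (q.1 ≤ e.1)) := by
      rw [hpe]
      simp only
      rw [h2, List.filter_filter]
      exact List.filter_congr (fun e _ => by
        rcases (show e.1 < q.1 ∨ q.1 ≤ e.1 by omega) with h | h <;> simp <;> omega)
    have hnd2 : (pvProcEnds ce q.1 (pvProcStarts cs q.1 cl).2).2.Nodup := by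
      rw [hpe]; exact pv_nodup_foldl_remove _ _ hnd1
    have hcl2 : ∀ c : Int, c ∈ (pvProcEnds ce q.1 (pvProcStarts cs q.1 cl).2).2 ↔
        (0 ≤ c ∧ c < (y.length : Int) ∧
          PySem.List.pyGetD y c 0 - PySem.List.pyGetD r c 0 ≤ q.1 ∧
          q.1 ≤ PySem.List.pyGetD y c 0 + PySem.List.pyGetD r c 0) := by
      intro c
      rw [hpe]
      simp only
      rw [pv_mem_foldl_remove, hcl1 c]
      constructor
      · rintro ⟨hin, hall⟩
        have hrange : 0 ≤ c ∧ c < (y.length : Int) := by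
          rcases hin with h | h
          · exact ⟨((h3 c).mp h).1, ((h3 c).mp h).2.1⟩
          · exact ⟨h.1, h.2.1⟩
        have hnotrem : ¬ (T ≤ PySem.List.pyGetD y c 0 + PySem.List.pyGetD r c 0 ∧
            PySem.List.pyGetD y c 0 + PySem.List.pyGetD r c 0 < q.1) := by
          rintro ⟨ha, hb⟩
          refine hall (PySem.List.pyGetD y c 0 + PySem.List.pyGetD r c 0, c) ?_ rfl
          rw [List.mem_filter, h2, List.mem_filter]
          exact ⟨⟨(pv_mem_CEL y r _).mpr ⟨c, hrange, rfl⟩, by simp; omega⟩, by simp; omega⟩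
        rcases hin with hold | hadd
        · have hc := (h3 c).mp hold
          exact ⟨hrange.1, hrange.2, by omega, by omega⟩
        · rcases (show T ≤ PySem.List.pyGetD y c 0 + PySem.List.pyGetD r c 0 ∨ PySem.List.pyGetD y c 0 + PySem.List.pyGetD r c 0 < T by omega) with hE | hE
          · exact ⟨hrange.1, hrange.2, by omega, by omega⟩
          · exfalso
            rcases h8 with rfl | hT
            · have h1b := hyb c
              have h2b := hrb c
              omega
            · exact hPre2 c hrange.1 hrange.2 T hT ⟨by omega, by omega⟩
      · rintro ⟨hc1, hc2, hc3, hc4⟩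
        constructor
        · by_cases hST : PySem.List.pyGetD y c 0 - PySem.List.pyGetD r c 0 ≤ T
          · exact Or.inl ((h3 c).mpr ⟨hc1, hc2, hST, by omega⟩)
          · exact Or.inr ⟨hc1, hc2, by omega, hc3⟩
        · intro e he hceq
          rw [List.mem_filter, h2, List.mem_filter] at he
          obtain ⟨⟨heC, _⟩, helt⟩ := he
          obtain ⟨j, hj, rfl⟩ := (pv_mem_CEL y r e).mp heC
          simp only [decide_eq_true_eq] at helt
          rw [hceq] at hc4
          simp only at helt hc4
          rw [hceq] at hc3
          omega
    have hperm : (pvProcEnds ce q.1 (pvProcStarts cs q.1 cl).2).2.Perm (pvCover y r q.1) :=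
      (List.perm_ext_iff_of_nodup hnd2 (pv_nodup_pvCover y r q.1)).mpr
        (fun a => by rw [hcl2 a, pv_mem_pvCover])
    have hlen : (pvProcEnds ce q.1 (pvProcStarts cs q.1 cl).2).2.length =
        (pvCover y r q.1).length := hperm.length_eq
    have hrestPW := (List.pairwise_cons.mp h5).2
    have hrestGE := (List.pairwise_cons.mp h5).1
    have h6' : ∀ q' ∈ rest, q' ∈ x.zip p := fun q' hq' => h6 q' (List.mem_cons_of_mem _ hq')
    have h8' : q.1 = -4294967297 ∨ q.1 ∈ (x.zip p).map Prod.fst := Or.inr htm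
    simp only [pvLoopA]
    rcases hcov : pvCover y r q.1 with _ | ⟨c0, rest0⟩
    · -- no cloud covers the town: the free branch
      rw [hcov] at hlen
      simp only [List.length_nil] at hlen
      rw [if_neg (by omega), if_pos hlen]
      obtain ⟨e1, e2, e3, e4⟩ := ih q.1 (pvProcStarts cs q.1 cl).1
        (pvProcEnds ce q.1 (pvProcStarts cs q.1 cl).2).1
        (pvProcEnds ce q.1 (pvProcStarts cs q.1 cl).2).2 d (free + q.2)
        hcs' hce' hcl2 hnd2 hrestPW h6' hrestGE h8' hd
      refine ⟨?_, ?_, ?_, e4⟩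
      · rw [e1, pv_sumFree_cons, if_pos hcov]; ring
      · intro c
        rw [e2 c, pv_sumKey_cons, if_neg (by rw [hcov]; simp)]
        ring
      · intro c
        rw [e3 c, pv_exists_cons]
        rw [hcov]
        simp
    · rcases rest0 with _ | ⟨c1, rest1⟩
      · -- exactly one cloud c0 covers the town
        have hsing : (pvProcEnds ce q.1 (pvProcStarts cs q.1 cl).2).2 = [c0] :=
          List.perm_singleton.mp (hcov ▸ hperm)
        rw [hsing]
        rw [show ([c0] : List Int).length = 1 from rfl, if_pos rfl]
        simp only [List.headD_cons]
        have hd' : (d.modify c0 0 (· + q.2)).keys.Nodup := by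
          rw [PySem.Dict.keys_modify]
          exact PySem.Dict.nodup_keys_insert _ _ _ hd
        have hcl2' : ∀ c : Int, c ∈ ([c0] : List Int) ↔
            (0 ≤ c ∧ c < (y.length : Int) ∧
              PySem.List.pyGetD y c 0 - PySem.List.pyGetD r c 0 ≤ q.1 ∧
              q.1 ≤ PySem.List.pyGetD y c 0 + PySem.List.pyGetD r c 0) := by
          intro c; rw [← hsing]; exact hcl2 c
        obtain ⟨e1, e2, e3, e4⟩ := ih q.1 (pvProcStarts cs q.1 cl).1
          (pvProcEnds ce q.1 (pvProcStarts cs q.1 cl).2).1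
          [c0] (d.modify c0 0 (· + q.2)) free
          hcs' hce' hcl2' (by simp) hrestPW h6' hrestGE h8' hd'
        refine ⟨?_, ?_, ?_, e4⟩
        · rw [e1, pv_sumFree_cons, if_neg (by rw [hcov]; simp)]
          ring
        · intro c
          rw [e2 c, pv_sumKey_cons, PySem.Dict.getD_modify]
          by_cases hc : c = c0
          · subst hc
            rw [if_pos rfl, if_pos (by rw [hcov])]
            ring
          · rw [if_neg hc, if_neg (by rw [hcov]; intro hh; exact hc (by injection hh with h; exact h.symm))]
            ring
        · intro c
          rw [e3 c, PySem.Dict.keys_modify, PySem.Dict.mem_keys_insert, pv_exists_cons, hcov]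
          constructor
          · rintro (⟨rfl | hk⟩ | hr)
            · exact Or.inr (Or.inl rfl)
            · exact Or.inl hk
            · exact Or.inr (Or.inr hr)
          · rintro (hk | hh | hr)
            · exact Or.inl (Or.inr hk)
            · exact Or.inl (Or.inl (by injection hh with h _; exact h.symm ▸ rfl))
            · exact Or.inr hr
      · -- two or more clouds cover the town
        rw [hcov] at hlen
        simp only [List.length_cons] at hlen
        rw [if_neg (by omega), if_neg (by omega)]
        obtain ⟨e1, e2, e3, e4⟩ := ih q.1 (pvProcStarts cs q.1 cl).1
          (pvProcEnds ce q.1 (pvProcStarts cs q.1 cl).2).1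
          (pvProcEnds ce q.1 (pvProcStarts cs q.1 cl).2).2 d free
          hcs' hce' hcl2 hnd2 hrestPW h6' hrestGE h8' hd
        refine ⟨?_, ?_, ?_, e4⟩
        · rw [e1, pv_sumFree_cons, if_neg (by rw [hcov]; simp)]
          ring
        · intro c
          rw [e2 c, pv_sumKey_cons, if_neg (by rw [hcov]; intro h; injection h with _ h2'; exact (List.cons_ne_nil _ _) h2')]
          ring
        · intro c
          rw [e3 c, pv_exists_cons, hcov]
          constructor
          · rintro (hk | hr)
            · exact Or.inl hk
            · exact Or.inr (Or.inr hr)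
          · rintro (hk | hh | hr)
            · exact Or.inl hk
            · exact absurd hh (by intro h; injection h with _ h2'; exact (List.cons_ne_nil _ _) h2')
            · exact Or.inr hr

lemma pv_loopB_char (y r : List Int) :
    ∀ (ts : List (Int × Int)) (st : Int × PySem.Dict Int Int),
      st.2.keys.Nodup →
      (ts.foldl (pvStepB y r) st).1 = st.1 + pvSumFree y r ts ∧
      (∀ c, (ts.foldl (pvStepB y r) st).2.getD c 0 = st.2.getD c 0 + pvSumKey y r c ts) ∧
      (∀ c, c ∈ (ts.foldl (pvStepB y r) st).2.keys ↔ c ∈ st.2.keys ∨ ∃ q ∈ ts, pvCover y r q.1 = [c]) ∧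
      (ts.foldl (pvStepB y r) st).2.keys.Nodup := by
  intro ts
  induction ts with
  | nil =>
    intro st h
    simp [pvSumFree, pvSumKey, h]
  | cons q rest ih =>
    intro st hnd
    rw [List.foldl_cons]
    rcases hcov : pvCover y r q.1 with _ | ⟨c0, rest0⟩
    · have hstep : pvStepB y r st q = (st.1 + q.2, st.2) := by
        simp [pvStepB, hcov]
      rw [hstep]
      obtain ⟨e1, e2, e3, e4⟩ := ih (st.1 + q.2, st.2) hnd
      refine ⟨?_, ?_, ?_, e4⟩
      · rw [e1, pv_sumFree_cons, if_pos hcov]; simp [add_assoc]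
      · intro c
        rw [e2 c, pv_sumKey_cons, if_neg (by rw [hcov]; simp)]
        simp
      · intro c
        rw [e3 c, pv_exists_cons, hcov]
        simp
    · rcases rest0 with _ | ⟨c1, rest1⟩
      · have hstep : pvStepB y r st q = (st.1, st.2.insert c0 (st.2.getD c0 0 + q.2)) := by
          simp [pvStepB, hcov]
        rw [hstep]
        have hnd' : (st.2.insert c0 (st.2.getD c0 0 + q.2)).keys.Nodup :=
          PySem.Dict.nodup_keys_insert _ _ _ hnd
        obtain ⟨e1, e2, e3, e4⟩ := ih (st.1, st.2.insert c0 (st.2.getD c0 0 + q.2)) hnd'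
        refine ⟨?_, ?_, ?_, e4⟩
        · rw [e1, pv_sumFree_cons, if_neg (by rw [hcov]; simp)]
          simp
        · intro c
          rw [e2 c, pv_sumKey_cons]
          simp only
          rw [PySem.Dict.getD_insert]
          by_cases hc : c = c0
          · subst hc
            rw [if_pos rfl, if_pos (by rw [hcov])]
            ring
          · rw [if_neg hc, if_neg (by rw [hcov]; intro hh; exact hc (by injection hh with h; exact h.symm))]
            ring
        · intro c
          rw [e3 c, pv_exists_cons, hcov]
          simp only [PySem.Dict.mem_keys_insert]
          constructor
          · rintro (⟨rfl | hk⟩ | hr)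
            · exact Or.inr (Or.inl rfl)
            · exact Or.inl hk
            · exact Or.inr (Or.inr hr)
          · rintro (hk | hh | hr)
            · exact Or.inl (Or.inr hk)
            · exact Or.inl (Or.inl (by injection hh with h _; exact h.symm ▸ rfl))
            · exact Or.inr hr
      · have hstep : pvStepB y r st q = st := by
          simp [pvStepB, hcov]
        rw [hstep]
        obtain ⟨e1, e2, e3, e4⟩ := ih st hnd
        refine ⟨?_, ?_, ?_, e4⟩
        · rw [e1, pv_sumFree_cons, if_neg (by rw [hcov]; simp)]
          ring
        · intro c
          rw [e2 c, pv_sumKey_cons, if_neg (by rw [hcov]; intro h; injection h with _ h2'; exact (List.cons_ne_nil _ _) h2')]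
          ring
        · intro c
          rw [e3 c, pv_exists_cons, hcov]
          constructor
          · rintro (hk | hr)
            · exact Or.inl hk
            · exact Or.inr (Or.inr hr)
          · rintro (hk | hh | hr)
            · exact Or.inl hk
            · exact absurd hh (by intro h; injection h with _ h2'; exact (List.cons_ne_nil _ _) h2')
            · exact Or.inr hr

lemma pv_max_getD_eq_of_perm (v1 v2 : List Int) (h : v1.Perm v2) :
    (PySem.List.max? v1 (fun v => v)).getD 0 = (PySem.List.max? v2 (fun v => v)).getD 0 := by
  cases h1 : PySem.List.max? v1 (fun v => v) with
  | none =>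
    have hv1 : v1 = [] := (PySem.List.max?_eq_none_iff _ _).mp h1
    subst hv1
    have hv2 : v2 = [] := h.symm.eq_nil
    subst hv2
    rfl
  | some m1 =>
    cases h2 : PySem.List.max? v2 (fun v => v) with
    | none =>
      have hv2 : v2 = [] := (PySem.List.max?_eq_none_iff _ _).mp h2
      subst hv2
      have hv1 : v1 = [] := h.eq_nil
      subst hv1
      rw [(PySem.List.max?_eq_none_iff ([] : List Int) (fun v => v)).mpr rfl] at h1
      simp at h1
    | some m2 =>
      have hm1 : m1 ∈ v2 := h.mem_iff.mp (PySem.List.max?_mem h1)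
      have hm2 : m2 ∈ v1 := h.mem_iff.mpr (PySem.List.max?_mem h2)
      have h12 : m1 ≤ m2 := PySem.List.max?_isMax h2 m1 hm1
      have h21 : m2 ≤ m1 := PySem.List.max?_isMax h1 m2 hm2
      simp [le_antisymm h12 h21]

-- ===== VERDICT (by name: the statement is the Claim_ definition above) =====
theorem maximumPeople_spec : Claim_equal_maximumPeople := by
  unfold Claim_equal_maximumPeople
  intro p x y r hDom hPre
  unfold Spec_maximumPeople
  have hDom' := hDom
  unfold Dom_maximumPeople at hDom'
  simp only [Bool.and_eq_true] at hDom'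
  obtain ⟨⟨⟨hpAll, hxAll⟩, hyAll⟩, hrAll⟩ := hDom'
  have hyb := fun i => pv_pyGetD_bound y hyAll i
  have hrb := fun i => pv_pyGetD_bound r hrAll i
  have hxElem : ∀ v ∈ x, -2147483648 ≤ v ∧ v ≤ 2147483648 := by
    intro v hv
    have := List.all_eq_true.mp hxAll _ hv
    simp [pvDomInt] at this
    omega
  have eA : maximumPeople p x y r =
      (PySem.List.max? (pvLoopA (PySem.List.sorted2 (x.zip p) Prod.fst Prod.snd)
        (pvCSL y r) (pvCEL y r) PySem.Set.empty PySem.Dict.empty 0).1.values (fun v => v)).getD 0 +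
      (pvLoopA (PySem.List.sorted2 (x.zip p) Prod.fst Prod.snd)
        (pvCSL y r) (pvCEL y r) PySem.Set.empty PySem.Dict.empty 0).2 := rfl
  have eB : maximumPeople_alt p x y r =
      (PySem.List.max? ((x.zip p).foldl (pvStepB y r) (0, PySem.Dict.empty)).2.values (fun v => v)).getD 0 +
      ((x.zip p).foldl (pvStepB y r) (0, PySem.Dict.empty)).1 := rfl
  have hpermT : (PySem.List.sorted2 (x.zip p) Prod.fst Prod.snd).Perm (x.zip p) :=
    PySem.List.sorted2_perm _ _ _ _
  have hInit1 : (pvCSL y r : List (Int × Int)) =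
      (pvCSL y r).filter (fun e => decide ((-4294967297 : Int) < e.1)) := by
    refine (List.filter_eq_self.mpr ?_).symm
    intro e he
    obtain ⟨j, _, rfl⟩ := (pv_mem_CSL y r e).mp he
    have h1b := hyb j
    have h2b := hrb j
    simp only [decide_eq_true_eq]
    omega
  have hInit2 : (pvCEL y r : List (Int × Int)) =
      (pvCEL y r).filter (fun e => decide ((-4294967297 : Int) ≤ e.1)) := by
    refine (List.filter_eq_self.mpr ?_).symm
    intro e he
    obtain ⟨j, _, rfl⟩ := (pv_mem_CEL y r e).mp he
    have h1b := hyb j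
    have h2b := hrb j
    simp only [decide_eq_true_eq]
    omega
  have hInit3 : ∀ c : Int, c ∈ (PySem.Set.empty : PySem.Set Int) ↔
      (0 ≤ c ∧ c < (y.length : Int) ∧
        PySem.List.pyGetD y c 0 - PySem.List.pyGetD r c 0 ≤ (-4294967297 : Int) ∧
        (-4294967297 : Int) ≤ PySem.List.pyGetD y c 0 + PySem.List.pyGetD r c 0) := by
    intro c
    constructor
    · intro h
      exact absurd h (List.not_mem_nil)
    · rintro ⟨_, _, hS, _⟩
      have h1b := hyb c
      have h2b := hrb c
      omega
  have hA := pv_loopA_char p x y r hDom hPre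
    (PySem.List.sorted2 (x.zip p) Prod.fst Prod.snd) (-4294967297)
    (pvCSL y r) (pvCEL y r) PySem.Set.empty PySem.Dict.empty 0
    hInit1 hInit2 hInit3 List.nodup_nil
    (pv_sorted2_pairwise_fst _ _ _)
    (fun q hq => hpermT.mem_iff.mp hq)
    (fun q hq => by
      have hqz : q ∈ x.zip p := hpermT.mem_iff.mp hq
      have hx1 : q.1 ∈ x := (List.of_mem_zip hqz).1
      have := hxElem q.1 hx1
      omega)
    (Or.inl rfl)
    (by rw [PySem.Dict.keys_empty]; exact List.nodup_nil)
  have hB := pv_loopB_char y r (x.zip p) (0, PySem.Dict.empty)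
    (by simp only; rw [PySem.Dict.keys_empty]; exact List.nodup_nil)
  obtain ⟨a1, a2, a3, a4⟩ := hA
  obtain ⟨b1, b2, b3, b4⟩ := hB
  have hkeySum : ∀ k : Int, pvSumKey y r k (PySem.List.sorted2 (x.zip p) Prod.fst Prod.snd) =
      pvSumKey y r k (x.zip p) :=
    fun k => List.Perm.sum_eq (List.Perm.map _ (hpermT.filter _))
  have hfree : pvSumFree y r (PySem.List.sorted2 (x.zip p) Prod.fst Prod.snd) =
      pvSumFree y r (x.zip p) :=
    List.Perm.sum_eq (List.Perm.map _ (hpermT.filter _))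
  have hk : ((pvLoopA (PySem.List.sorted2 (x.zip p) Prod.fst Prod.snd)
      (pvCSL y r) (pvCEL y r) PySem.Set.empty PySem.Dict.empty 0).1.keys).Perm
      (((x.zip p).foldl (pvStepB y r) (0, PySem.Dict.empty)).2.keys) := by
    refine (List.perm_ext_iff_of_nodup a4 b4).mpr ?_
    intro c
    rw [a3 c, b3 c]
    simp only [PySem.Dict.keys_empty, List.not_mem_nil, false_or]
    constructor
    · rintro ⟨q, hq, hc⟩
      exact ⟨q, hpermT.mem_iff.mp hq, hc⟩
    · rintro ⟨q, hq, hc⟩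
      exact ⟨q, hpermT.mem_iff.mpr hq, hc⟩
  have hvA : (pvLoopA (PySem.List.sorted2 (x.zip p) Prod.fst Prod.snd)
      (pvCSL y r) (pvCEL y r) PySem.Set.empty PySem.Dict.empty 0).1.values =
      ((pvLoopA (PySem.List.sorted2 (x.zip p) Prod.fst Prod.snd)
        (pvCSL y r) (pvCEL y r) PySem.Set.empty PySem.Dict.empty 0).1.keys).map
        (fun k => pvSumKey y r k (x.zip p)) := by
    rw [PySem.Dict.values_eq_map_keys _ a4 0]
    apply List.map_congr_left
    intro k _
    rw [a2 k, PySem.Dict.getD_empty, hkeySum k]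
    ring
  have hvB : (((x.zip p).foldl (pvStepB y r) (0, PySem.Dict.empty)).2).values =
      ((((x.zip p).foldl (pvStepB y r) (0, PySem.Dict.empty)).2).keys).map
        (fun k => pvSumKey y r k (x.zip p)) := by
    rw [PySem.Dict.values_eq_map_keys _ b4 0]
    apply List.map_congr_left
    intro k _
    rw [b2 k]
    simp only
    rw [PySem.Dict.getD_empty]
    ring
  have hvPerm : ((pvLoopA (PySem.List.sorted2 (x.zip p) Prod.fst Prod.snd)
      (pvCSL y r) (pvCEL y r) PySem.Set.empty PySem.Dict.empty 0).1.values).Perm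
      ((((x.zip p).foldl (pvStepB y r) (0, PySem.Dict.empty)).2).values) := by
    rw [hvA, hvB]
    exact hk.map _
  rw [eA, eB, pv_max_getD_eq_of_perm _ _ hvPerm, a1, hfree]
  have b1' := b1
  simp only at b1'
  rw [b1']
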